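-- pv_equiv track=rewrite | github.com/1Rajveer-Singh/Meadi-ai | backend/agents/research/research_agent.py | _determine_evidence_level
-- ===== SOURCE A (Python) =====
-- from typing import Dict, List, Optional, Any
--
-- def _determine_evidence_level(pub_types: List[str]) -> str:
--     """Determine evidence level from publication types"""
--     pub_types_lower = [pt.lower() for pt in pub_types]
--
--     if any('meta-analysis' in pt or 'systematic review' in pt for pt in pub_types_lower):
--         return 'Level I'
--     elif any('randomized controlled trial' in pt or 'clinical trial' in pt for pt in pub_types_lower):
--         return 'Level I'
--     elif any('cohort' in pt or 'prospective' in pt for pt in pub_types_lower):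
--         return 'Level II'
--     elif any('case-control' in pt for pt in pub_types_lower):
--         return 'Level III'
--     elif any('case report' in pt or 'case series' in pt for pt in pub_types_lower):
--         return 'Level IV'
--     else:
--         return 'Level V'
-- ===== SOURCE B (Python) =====
-- from typing import List
--
-- _KEYWORD_RANKS = [
--     ('meta-analysis', 1), ('systematic review', 1),
--     ('randomized controlled trial', 2), ('clinical trial', 2),
--     ('cohort', 3), ('prospective', 3),
--     ('case-control', 4),
--     ('case report', 5), ('case series', 5),
-- ]
--
-- _LEVEL_NAMES = {1: 'Level I', 2: 'Level I', 3: 'Level II', 4: 'Level III', 5: 'Level IV'}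
--
-- def _rank(pt: str) -> int:
--     pt = pt.lower()
--     return min((r for kw, r in _KEYWORD_RANKS if kw in pt), default=6)
--
-- def _determine_evidence_level(pub_types: List[str]) -> str:
--     best = min((_rank(pt) for pt in pub_types), default=6)
--     return _LEVEL_NAMES.get(best, 'Level V')
-- ===== Notes on version B (the rewrite author's own statement) =====
-- stated objective: alternative
-- what changed: Instead of five staged scans over the whole list (one per elif branch), B scores each publication type once with a numeric rank (min rank over a keyword->rank table, 6 if none), aggregates by taking the minimum rank over the list, and maps the best rank to its level name.
import Mathlib
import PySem

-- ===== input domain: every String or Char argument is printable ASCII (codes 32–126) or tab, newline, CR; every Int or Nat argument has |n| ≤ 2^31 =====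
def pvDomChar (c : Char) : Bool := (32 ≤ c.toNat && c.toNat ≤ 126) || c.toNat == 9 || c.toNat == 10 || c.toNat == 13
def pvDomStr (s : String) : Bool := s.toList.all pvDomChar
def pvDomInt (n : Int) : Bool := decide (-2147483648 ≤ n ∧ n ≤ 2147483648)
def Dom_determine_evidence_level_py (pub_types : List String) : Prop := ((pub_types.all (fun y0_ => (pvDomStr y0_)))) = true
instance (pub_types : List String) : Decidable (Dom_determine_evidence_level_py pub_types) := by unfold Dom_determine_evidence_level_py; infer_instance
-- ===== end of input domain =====

-- B replaces A's five staged any-scans of the whole list by a per-element numeric rank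
-- (min over a keyword->rank table), one min aggregation over the list, and a rank->name lookup.

-- ===== PORT A =====
def determine_evidence_level_py (pub_types : List String) : String :=
  let ptl := pub_types.map PySem.Str.lower
  if ptl.any (fun pt => PySem.Str.isIn "meta-analysis" pt || PySem.Str.isIn "systematic review" pt) then "Level I"
  else if ptl.any (fun pt => PySem.Str.isIn "randomized controlled trial" pt || PySem.Str.isIn "clinical trial" pt) then "Level I"
  else if ptl.any (fun pt => PySem.Str.isIn "cohort" pt || PySem.Str.isIn "prospective" pt) then "Level II"
  else if ptl.any (fun pt => PySem.Str.isIn "case-control" pt) then "Level III"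
  else if ptl.any (fun pt => PySem.Str.isIn "case report" pt || PySem.Str.isIn "case series" pt) then "Level IV"
  else "Level V"

-- ===== PORT B =====
def pvKeywordRanks : List (String × Nat) :=
  [("meta-analysis", 1), ("systematic review", 1),
   ("randomized controlled trial", 2), ("clinical trial", 2),
   ("cohort", 3), ("prospective", 3),
   ("case-control", 4),
   ("case report", 5), ("case series", 5)]

def pvLevelNames : PySem.Dict Nat String :=
  PySem.Dict.ofList [(1, "Level I"), (2, "Level I"), (3, "Level II"), (4, "Level III"), (5, "Level IV")]

-- min(iterable, default=6): 6 on the empty list, otherwise a running min over the elements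
def pvMinD (l : List Nat) : Nat :=
  match l with
  | [] => 6
  | x :: rest => rest.foldl min x

def pvRank (pt : String) : Nat :=
  pvMinD (pvKeywordRanks.filterMap (fun p => if PySem.Str.isIn p.1 (PySem.Str.lower pt) then some p.2 else none))

def determine_evidence_level_py_alt (pub_types : List String) : String :=
  let best := pvMinD (pub_types.map pvRank)
  PySem.Dict.getD pvLevelNames best "Level V"

-- ===== PRECONDITION & SPEC =====
def Spec_determine_evidence_level_py (pub_types : List String) (out : String) : Prop := out = determine_evidence_level_py_alt pub_types
instance (pub_types : List String) (out : String) : Decidable (Spec_determine_evidence_level_py pub_types out) := by unfold Spec_determine_evidence_level_py; infer_instance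

-- ===== CLAIM (what is proved, stated in full; the proofs are below) =====
def Claim_equal_determine_evidence_level_py : Prop := ∀ (pub_types : List String), Dom_determine_evidence_level_py pub_types → Spec_determine_evidence_level_py pub_types (determine_evidence_level_py pub_types)

-- ===== LEMMAS AND PROOFS =====

-- tier-i condition on an (already lowered) string, as written in A
def pvC1 (s : String) : Bool := PySem.Str.isIn "meta-analysis" s || PySem.Str.isIn "systematic review" s
def pvC2 (s : String) : Bool := PySem.Str.isIn "randomized controlled trial" s || PySem.Str.isIn "clinical trial" s
def pvC3 (s : String) : Bool := PySem.Str.isIn "cohort" s || PySem.Str.isIn "prospective" s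
def pvC4 (s : String) : Bool := PySem.Str.isIn "case-control" s
def pvC5 (s : String) : Bool := PySem.Str.isIn "case report" s || PySem.Str.isIn "case series" s

-- pvRank computes the first matching tier (6 if none)
theorem pvRank_eq (pt : String) :
    pvRank pt =
      (if pvC1 (PySem.Str.lower pt) then 1 else if pvC2 (PySem.Str.lower pt) then 2
       else if pvC3 (PySem.Str.lower pt) then 3 else if pvC4 (PySem.Str.lower pt) then 4
       else if pvC5 (PySem.Str.lower pt) then 5 else 6) := by
  unfold pvRank pvKeywordRanks pvC1 pvC2 pvC3 pvC4 pvC5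
  simp only [List.filterMap_cons, List.filterMap_nil]
  generalize PySem.Str.lower pt = s
  generalize PySem.Str.isIn "meta-analysis" s = b1
  generalize PySem.Str.isIn "systematic review" s = b2
  generalize PySem.Str.isIn "randomized controlled trial" s = b3
  generalize PySem.Str.isIn "clinical trial" s = b4
  generalize PySem.Str.isIn "cohort" s = b5
  generalize PySem.Str.isIn "prospective" s = b6
  generalize PySem.Str.isIn "case-control" s = b7
  generalize PySem.Str.isIn "case report" s = b8
  generalize PySem.Str.isIn "case series" s = b9
  revert b1 b2 b3 b4 b5 b6 b7 b8 b9
  decide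

theorem foldl_min_le_iff (l : List Nat) (a i : Nat) :
    l.foldl min a ≤ i ↔ a ≤ i ∨ ∃ x ∈ l, x ≤ i := by
  induction l generalizing a with
  | nil => simp
  | cons y t ih =>
      rw [List.foldl_cons, ih]
      simp only [min_le_iff, List.mem_cons]
      aesop

theorem pvMinD_le_iff (l : List Nat) (i : Nat) (hi : i < 6) :
    pvMinD l ≤ i ↔ ∃ x ∈ l, x ≤ i := by
  cases l with
  | nil => simp [pvMinD]; omega
  | cons x t =>
      rw [pvMinD, foldl_min_le_iff]
      simp only [List.mem_cons]
      aesop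

theorem pvMinD_le_six (l : List Nat) (h : ∀ x ∈ l, x ≤ 6) : pvMinD l ≤ 6 := by
  cases l with
  | nil => simp [pvMinD]
  | cons x t => exact le_trans (PySem.List.foldl_min_le t x).1 (h x (List.mem_cons_self))

theorem pvMinD_pos (l : List Nat) (h : ∀ x ∈ l, 1 ≤ x) : 1 ≤ pvMinD l := by
  cases l with
  | nil => simp [pvMinD]
  | cons x t =>
      by_contra hc
      have h5 : pvMinD (x :: t) ≤ 0 := by omega
      obtain ⟨y, hy, hy0⟩ := (pvMinD_le_iff _ 0 (by omega)).mp h5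
      exact absurd (h y hy) (by omega)

theorem pvRank_le_six (pt : String) : pvRank pt ≤ 6 := by
  rw [pvRank_eq]; split_ifs <;> omega

theorem pvRank_pos (pt : String) : 1 ≤ pvRank pt := by
  rw [pvRank_eq]; split_ifs <;> omega

theorem pvRank_le_one (pt : String) : pvRank pt ≤ 1 ↔ pvC1 (PySem.Str.lower pt) = true := by
  rw [pvRank_eq]; split_ifs <;> simp_all
theorem pvRank_le_two (pt : String) :
    pvRank pt ≤ 2 ↔ (pvC1 (PySem.Str.lower pt) || pvC2 (PySem.Str.lower pt)) = true := by
  rw [pvRank_eq]; split_ifs <;> simp_all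
theorem pvRank_le_three (pt : String) :
    pvRank pt ≤ 3 ↔ (pvC1 (PySem.Str.lower pt) || pvC2 (PySem.Str.lower pt) || pvC3 (PySem.Str.lower pt)) = true := by
  rw [pvRank_eq]; split_ifs <;> simp_all
theorem pvRank_le_four (pt : String) :
    pvRank pt ≤ 4 ↔ (pvC1 (PySem.Str.lower pt) || pvC2 (PySem.Str.lower pt) || pvC3 (PySem.Str.lower pt) || pvC4 (PySem.Str.lower pt)) = true := by
  rw [pvRank_eq]; split_ifs <;> simp_all
theorem pvRank_le_five (pt : String) :
    pvRank pt ≤ 5 ↔ (pvC1 (PySem.Str.lower pt) || pvC2 (PySem.Str.lower pt) || pvC3 (PySem.Str.lower pt) || pvC4 (PySem.Str.lower pt) || pvC5 (PySem.Str.lower pt)) = true := by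
  rw [pvRank_eq]; split_ifs <;> simp_all

theorem pvOrE {a b : Bool} (h : (a || b) = true) : a = true ∨ b = true := by simpa using h
theorem pvOrIr {a b : Bool} (h : b = true) : (a || b) = true := by simp [h]

set_option maxHeartbeats 2000000 in
theorem pv_main_eq (pub_types : List String) :
    determine_evidence_level_py pub_types = determine_evidence_level_py_alt pub_types := by
  unfold determine_evidence_level_py determine_evidence_level_py_alt
  simp only [List.any_map]
  set best := pvMinD (pub_types.map pvRank) with hbest
  have hle : ∀ i : Nat, i < 6 → (best ≤ i ↔ ∃ pt ∈ pub_types, pvRank pt ≤ i) := by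
    intro i hi
    rw [hbest, pvMinD_le_iff _ _ hi]
    constructor
    · rintro ⟨x, hx, hxi⟩
      obtain ⟨pt, hpt, rfl⟩ := List.mem_map.mp hx
      exact ⟨pt, hpt, hxi⟩
    · rintro ⟨pt, hpt, h⟩
      exact ⟨pvRank pt, List.mem_map_of_mem hpt, h⟩
  have h6 : best ≤ 6 := by
    apply pvMinD_le_six; intro x hx
    obtain ⟨pt, _, rfl⟩ := List.mem_map.mp hx
    exact pvRank_le_six pt
  have h0 : 1 ≤ best := by
    apply pvMinD_pos; intro x hx
    obtain ⟨pt, _, rfl⟩ := List.mem_map.mp hx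
    exact pvRank_pos pt
  split_ifs with h1 h2 h3 h4 h5
  · obtain ⟨pt, hpt, hc⟩ := List.any_eq_true.mp h1
    have hub : best ≤ 1 := (hle 1 (by omega)).mpr ⟨pt, hpt, (pvRank_le_one pt).mpr hc⟩
    have hb : best = 1 := by omega
    rw [hb]; rfl
  · obtain ⟨pt, hpt, hc⟩ := List.any_eq_true.mp h2
    have hub : best ≤ 2 := (hle 2 (by omega)).mpr ⟨pt, hpt, (pvRank_le_two pt).mpr (pvOrIr hc)⟩
    have hlb : ¬ best ≤ 1 := fun hb => by
      obtain ⟨q, hq, hr⟩ := (hle 1 (by omega)).mp hb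
      exact (List.any_eq_true.not.mp h1) ⟨q, hq, (pvRank_le_one q).mp hr⟩
    have hb : best = 2 := by omega
    rw [hb]; rfl
  · obtain ⟨pt, hpt, hc⟩ := List.any_eq_true.mp h3
    have hub : best ≤ 3 := (hle 3 (by omega)).mpr ⟨pt, hpt, (pvRank_le_three pt).mpr (pvOrIr hc)⟩
    have hlb : ¬ best ≤ 2 := fun hb => by
      obtain ⟨q, hq, hr⟩ := (hle 2 (by omega)).mp hb
      rcases pvOrE ((pvRank_le_two q).mp hr) with hc' | hc'
      · exact (List.any_eq_true.not.mp h1) ⟨q, hq, hc'⟩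
      · exact (List.any_eq_true.not.mp h2) ⟨q, hq, hc'⟩
    have hb : best = 3 := by omega
    rw [hb]; rfl
  · obtain ⟨pt, hpt, hc⟩ := List.any_eq_true.mp h4
    have hub : best ≤ 4 := (hle 4 (by omega)).mpr ⟨pt, hpt, (pvRank_le_four pt).mpr (pvOrIr hc)⟩
    have hlb : ¬ best ≤ 3 := fun hb => by
      obtain ⟨q, hq, hr⟩ := (hle 3 (by omega)).mp hb
      rcases pvOrE ((pvRank_le_three q).mp hr) with hc' | hc'
      · rcases pvOrE hc' with hc'' | hc''
        · exact (List.any_eq_true.not.mp h1) ⟨q, hq, hc''⟩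
        · exact (List.any_eq_true.not.mp h2) ⟨q, hq, hc''⟩
      · exact (List.any_eq_true.not.mp h3) ⟨q, hq, hc'⟩
    have hb : best = 4 := by omega
    rw [hb]; rfl
  · obtain ⟨pt, hpt, hc⟩ := List.any_eq_true.mp h5
    have hub : best ≤ 5 := (hle 5 (by omega)).mpr ⟨pt, hpt, (pvRank_le_five pt).mpr (pvOrIr hc)⟩
    have hlb : ¬ best ≤ 4 := fun hb => by
      obtain ⟨q, hq, hr⟩ := (hle 4 (by omega)).mp hb
      rcases pvOrE ((pvRank_le_four q).mp hr) with hc' | hc'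
      · rcases pvOrE hc' with hc'' | hc''
        · rcases pvOrE hc'' with hc3 | hc3
          · exact (List.any_eq_true.not.mp h1) ⟨q, hq, hc3⟩
          · exact (List.any_eq_true.not.mp h2) ⟨q, hq, hc3⟩
        · exact (List.any_eq_true.not.mp h3) ⟨q, hq, hc''⟩
      · exact (List.any_eq_true.not.mp h4) ⟨q, hq, hc'⟩
    have hb : best = 5 := by omega
    rw [hb]; rfl
  · have hlb : ¬ best ≤ 5 := fun hb => by
      obtain ⟨q, hq, hr⟩ := (hle 5 (by omega)).mp hb
      rcases pvOrE ((pvRank_le_five q).mp hr) with hc' | hc'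
      · rcases pvOrE hc' with hc'' | hc''
        · rcases pvOrE hc'' with hc3 | hc3
          · rcases pvOrE hc3 with hc4 | hc4
            · exact (List.any_eq_true.not.mp h1) ⟨q, hq, hc4⟩
            · exact (List.any_eq_true.not.mp h2) ⟨q, hq, hc4⟩
          · exact (List.any_eq_true.not.mp h3) ⟨q, hq, hc3⟩
        · exact (List.any_eq_true.not.mp h4) ⟨q, hq, hc''⟩
      · exact (List.any_eq_true.not.mp h5) ⟨q, hq, hc'⟩
    have hb : best = 6 := by omega
    rw [hb]; rfl

-- ===== VERDICT (by name: the statement is the Claim_ definition above) =====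
theorem determine_evidence_level_py_spec : Claim_equal_determine_evidence_level_py := by
  intro pub_types _
  unfold Spec_determine_evidence_level_py
  exact pv_main_eq pub_types
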